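-- pv_equiv track=rewrite | github.com/sanjay-lan/Machine-Learning-based-Frame-shift-mutation-analysis | frame_shift+1/FS+1_first_occ.py | count_TGA_j_followed_by_k
-- ===== SOURCE A (Python) =====
-- def count_TGA_j_followed_by_k(gene_sequence, j, k):
--     first_occ = 0
--
--     codons_rx = ["ttg", "ctg", "atg", "gtg"]
--     codons_ry = ["att", "atc", "ata", "atg", "act", "acc", "aca", "acg", "aat", "aac", "aaa", "aag", "agt", "agc",
--                  "aga", "agg"]
--
--     for i in range(0, len(gene_sequence) - 3, 3):
--         codon = gene_sequence[i:i + 3]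
--         next_codon = gene_sequence[i + 3:i + 6]
--
--         if codon == j and next_codon == k:
--             if j in codons_rx and k in codons_ry:
--                 if first_occ == 0:
--                     first_occ = (i // 3) + 1
--
--     return first_occ
-- ===== SOURCE B (Python) =====
-- def count_TGA_j_followed_by_k(gene_sequence, j, k):
--     codons_rx = ["ttg", "ctg", "atg", "gtg"]
--     codons_ry = ["att", "atc", "ata", "atg", "act", "acc", "aca", "acg", "aat", "aac", "aaa", "aag", "agt", "agc",
--                  "aga", "agg"]
--     # invalid codons can never count, so test them once up front
--     if j not in codons_rx or k not in codons_ry: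
--         return 0
--     # C-level substring search for the 6-char pattern, keeping only frame-aligned hits
--     target = j + k
--     start = 0
--     while True:
--         idx = gene_sequence.find(target, start)
--         if idx == -1:
--             return 0
--         if idx % 3 == 0:
--             return idx // 3 + 1
--         start = idx + 1
-- ===== Notes on version B (the rewrite author's own statement) =====
-- stated objective: faster
-- what changed: Instead of A's explicit stride-3 scan that slices and compares two codons at every frame position, B hoists the two invariant membership guards out and searches the sequence with str.find for the concatenated 6-character pattern j+k, skipping non-frame-aligned hits (idx % 3 != 0) and returning idx//3+1 at the first aligned one.
import Mathlib
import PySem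

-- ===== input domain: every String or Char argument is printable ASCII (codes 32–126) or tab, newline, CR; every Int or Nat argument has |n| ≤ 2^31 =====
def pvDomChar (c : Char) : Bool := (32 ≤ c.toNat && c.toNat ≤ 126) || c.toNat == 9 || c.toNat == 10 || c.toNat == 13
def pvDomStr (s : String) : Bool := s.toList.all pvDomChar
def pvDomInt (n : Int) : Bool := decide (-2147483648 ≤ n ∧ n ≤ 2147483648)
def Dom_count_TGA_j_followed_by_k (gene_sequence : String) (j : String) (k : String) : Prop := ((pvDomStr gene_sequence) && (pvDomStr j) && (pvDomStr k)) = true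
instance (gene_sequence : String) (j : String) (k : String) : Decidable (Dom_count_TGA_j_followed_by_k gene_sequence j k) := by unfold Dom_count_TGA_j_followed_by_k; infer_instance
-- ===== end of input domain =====

-- B replaces A's explicit stride-3 slice-and-compare scan by an str.find substring search for
-- the concatenated pattern j+k (membership guards hoisted out), keeping only frame-aligned hits.


def pvCodonsRx : List String := ["ttg", "ctg", "atg", "gtg"]
def pvCodonsRy : List String := ["att", "atc", "ata", "atg", "act", "acc", "aca", "acg",
                                 "aat", "aac", "aaa", "aag", "agt", "agc", "aga", "agg"]

-- ===== PORT A =====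
def count_TGA_j_followed_by_k (gene_sequence : String) (j : String) (k : String) : Int :=
  (PySem.List.pyRange 0 (PySem.Str.len gene_sequence - 3) 3).foldl
    (fun first_occ i =>
      let codon := PySem.Str.slice gene_sequence (some i) (some (i + 3))
      let next_codon := PySem.Str.slice gene_sequence (some (i + 3)) (some (i + 6))
      if codon = j ∧ next_codon = k then
        if j ∈ pvCodonsRx ∧ k ∈ pvCodonsRy then
          if first_occ = 0 then PySem.Int.floordiv i 3 + 1 else first_occ
        else first_occ
      else first_occ) 0

-- ===== PORT B =====
-- the while loop of Source B: repeated gene_sequence.find(target, start); the fuel argument is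
-- only Lean's totality device (one unit per loop iteration; never exhausted on the initial call)
def pvBLoop (g target : String) (fuel : Nat) (start : Int) : Int :=
  match fuel with
  | 0 => 0
  | fuel + 1 =>
    let idx := PySem.Str.findFrom g target start none
    if idx = -1 then 0
    else if PySem.Int.mod idx 3 = 0 then PySem.Int.floordiv idx 3 + 1
    else pvBLoop g target fuel (idx + 1)

def count_TGA_j_followed_by_k_alt (gene_sequence : String) (j : String) (k : String) : Int :=
  if ¬ (j ∈ pvCodonsRx) ∨ ¬ (k ∈ pvCodonsRy) then 0
  else pvBLoop gene_sequence (j ++ k) (gene_sequence.toList.length + 1) 0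

-- ===== PRECONDITION & SPEC =====
def Spec_count_TGA_j_followed_by_k (gene_sequence : String) (j : String) (k : String) (out : Int) : Prop := out = count_TGA_j_followed_by_k_alt gene_sequence j k
instance (gene_sequence : String) (j : String) (k : String) (out : Int) : Decidable (Spec_count_TGA_j_followed_by_k gene_sequence j k out) := by unfold Spec_count_TGA_j_followed_by_k; infer_instance

-- ===== CLAIM (what is proved, stated in full; the proofs are below) =====
def Claim_equal_count_TGA_j_followed_by_k : Prop := ∀ (gene_sequence : String) (j : String) (k : String), Dom_count_TGA_j_followed_by_k gene_sequence j k → Spec_count_TGA_j_followed_by_k gene_sequence j k (count_TGA_j_followed_by_k gene_sequence j k)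

-- ===== LEMMAS AND PROOFS =====

-- A's loop body, abstracted
def pvBodyA (g j k : String) (first_occ i : Int) : Int :=
  let codon := PySem.Str.slice g (some i) (some (i + 3))
  let next_codon := PySem.Str.slice g (some (i + 3)) (some (i + 6))
  if codon = j ∧ next_codon = k then
    if j ∈ pvCodonsRx ∧ k ∈ pvCodonsRy then
      if first_occ = 0 then PySem.Int.floordiv i 3 + 1 else first_occ
    else first_occ
  else first_occ

-- reference function both ports are reduced to: first frame index m ≥ m0 whose window matches
def pvAligned (G t : List Char) (m : Nat) : Int :=
  if _h : 3*m < G.length then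
    (if t <+: G.drop (3*m) then (m : Int) + 1 else pvAligned G t (m+1))
  else 0
termination_by G.length - 3*m
decreasing_by omega

lemma pv_bodyA_eq (g j k : String) :
    count_TGA_j_followed_by_k g j k
      = (PySem.List.pyRange 0 (PySem.Str.len g - 3) 3).foldl (pvBodyA g j k) 0 := rfl

-- step-3 induction forms of pyRange
lemma pv_pyRange_three_cons (a b : Int) (hab : a < b) :
    PySem.List.pyRange a b 3 = a :: PySem.List.pyRange (a + 3) b 3 := by
  rw [PySem.List.pyRange_of_pos _ _ (by norm_num : (0:Int) < 3),
      PySem.List.pyRange_of_pos _ _ (by norm_num : (0:Int) < 3)]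
  rw [if_pos hab]
  by_cases h2 : a + 3 < b
  · rw [if_pos h2]
    have hn : ((b - a + 3 - 1)/3).toNat = ((b - (a+3) + 3 - 1)/3).toNat + 1 := by omega
    rw [hn, List.range_succ_eq_map]
    simp [List.map_map, Function.comp]
    intro n _
    ring
  · rw [if_neg h2]
    have hn : ((b - a + 3 - 1)/3).toNat = 1 := by omega
    rw [hn]
    simp

lemma pv_pyRange_three_nil (a b : Int) (hab : b ≤ a) :
    PySem.List.pyRange a b 3 = [] := by
  rw [PySem.List.pyRange_of_pos _ _ (by norm_num : (0:Int) < 3), if_neg (by omega)]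
  simp

-- once the accumulator is nonzero, A's loop never changes it
lemma pv_fold_frozen (g j k : String) (l : List Int) (a : Int) (ha : a ≠ 0) :
    l.foldl (pvBodyA g j k) a = a := by
  induction l with
  | nil => rfl
  | cons b t ih =>
    have hb : pvBodyA g j k a b = a := by
      unfold pvBodyA
      split_ifs <;> simp_all
    simpa [hb] using ih

-- if the membership guard fails, A's loop never changes the accumulator
lemma pv_fold_nomem (g j k : String) (l : List Int) (a : Int)
    (hmem : ¬ (j ∈ pvCodonsRx ∧ k ∈ pvCodonsRy)) :
    l.foldl (pvBodyA g j k) a = a := by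
  induction l generalizing a with
  | nil => rfl
  | cons b t ih =>
    have hb : pvBodyA g j k a b = a := by
      unfold pvBodyA
      split_ifs
      all_goals simp_all
    simpa [hb] using ih a

-- String equality through toList
lemma pv_str_eq_iff (s t : String) : s = t ↔ s.toList = t.toList :=
  ⟨fun h => by rw [h], fun h => by rwa [String.toList_inj] at h⟩

-- A's two slice comparisons at aligned index 3m, as one prefix fact about j++k
lemma pv_cond_iff (g j k : String) (m : Nat)
    (hj : j.toList.length = 3) (hk : k.toList.length = 3) :
    (PySem.Str.slice g (some ((3*m : Nat) : Int)) (some (((3*m : Nat) : Int) + 3)) = j ∧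
     PySem.Str.slice g (some (((3*m : Nat) : Int) + 3)) (some (((3*m : Nat) : Int) + 6)) = k)
      ↔ (j.toList ++ k.toList) <+: g.toList.drop (3*m) := by
  rw [pv_str_eq_iff, pv_str_eq_iff, PySem.Str.toList_slice, PySem.Str.toList_slice]
  have h3 : (((3*m : Nat) : Int) + 3) = (((3*m+3 : Nat)) : Int) := by push_cast; ring
  have h6 : (((3*m : Nat) : Int) + 6) = (((3*m+6 : Nat)) : Int) := by push_cast; ring
  rw [h3, h6]
  simp only [PySem.Chars.slice]
  rw [PySem.List.slice_natCast, PySem.List.slice_natCast]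
  have e1 : (3*m+3) - 3*m = 3 := by omega
  have e2 : (3*m+6) - (3*m+3) = 3 := by omega
  rw [e1, e2]
  rw [List.prefix_iff_eq_take]
  have hlen : (j.toList ++ k.toList).length = 6 := by simp [hj, hk]
  rw [hlen]
  have hsplit : (g.toList.drop (3*m)).take 6
      = (g.toList.drop (3*m)).take 3 ++ (g.toList.drop (3*m+3)).take 3 := by
    rw [show (6:Nat) = 3 + 3 from rfl, List.take_add, List.drop_drop]
  rw [hsplit]
  constructor
  · rintro ⟨h1, h2⟩
    rw [h1, h2]
  · intro h
    by_cases hl : j.toList.length = ((g.toList.drop (3*m)).take 3).length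
    · obtain ⟨ha, hb⟩ := List.append_inj h hl
      exact ⟨ha.symm, hb.symm⟩
    · exfalso
      have := congrArg List.length h
      simp [hj, hk] at this hl
      omega

-- when no window at or beyond m can match, pvAligned returns 0
lemma pv_aligned_zero (G t : List Char) (m : Nat)
    (h : ∀ m', m ≤ m' → ¬ t <+: G.drop (3*m')) : pvAligned G t m = 0 := by
  rw [pvAligned]
  split_ifs with h1 h2
  · exact absurd h2 (h m le_rfl)
  · exact pv_aligned_zero G t (m+1) (fun m' hm' => h m' (by omega))
  · rfl
termination_by G.length - 3*m
decreasing_by omega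

-- pvAligned skips frames with no match
lemma pv_aligned_skip (G t : List Char) (m0 m1 : Nat) (hle : m0 ≤ m1)
    (h : ∀ m, m0 ≤ m → m < m1 → 3*m < G.length ∧ ¬ t <+: G.drop (3*m)) :
    pvAligned G t m0 = pvAligned G t m1 := by
  rcases Nat.eq_or_lt_of_le hle with heq | hlt
  · rw [heq]
  · have h0 := h m0 le_rfl hlt
    rw [pvAligned, dif_pos h0.1, if_neg h0.2]
    exact pv_aligned_skip G t (m0+1) m1 (by omega) (fun m hm hm' => h m (by omega) hm')
termination_by m1 - m0
decreasing_by omega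

lemma pv_aligned_hit (G t : List Char) (m : Nat)
    (h1 : 3*m < G.length) (h2 : t <+: G.drop (3*m)) :
    pvAligned G t m = (m : Int) + 1 := by
  rw [pvAligned, dif_pos h1, if_pos h2]

-- A's fold, started at frame m with accumulator 0, is pvAligned (membership holding, codons 3-long)
lemma pv_A_eq_aligned (g j k : String) (hmem : j ∈ pvCodonsRx ∧ k ∈ pvCodonsRy)
    (hj : j.toList.length = 3) (hk : k.toList.length = 3) (m : Nat) :
    (PySem.List.pyRange ((3*m : Nat) : Int) ((g.toList.length : Int) - 3) 3).foldl
      (pvBodyA g j k) 0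
    = pvAligned g.toList (j.toList ++ k.toList) m := by
  by_cases hlt : ((3*m : Nat) : Int) < (g.toList.length : Int) - 3
  · rw [pv_pyRange_three_cons _ _ hlt]
    simp only [List.foldl_cons]
    by_cases hc : (j.toList ++ k.toList) <+: g.toList.drop (3*m)
    · have hcond : pvBodyA g j k 0 ((3*m : Nat) : Int) = (m : Int) + 1 := by
        unfold pvBodyA
        rw [if_pos ((pv_cond_iff g j k m hj hk).2 hc), if_pos hmem, if_pos rfl]
        have : PySem.Int.floordiv ((3*m : Nat) : Int) 3 = (m : Int) := by
          simp [PySem.Int.floordiv]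
        rw [this]
      rw [hcond, pv_fold_frozen g j k _ _ (by omega)]
      rw [pv_aligned_hit _ _ _ (by omega) hc]
    · have hcond : pvBodyA g j k 0 ((3*m : Nat) : Int) = 0 := by
        unfold pvBodyA
        rw [if_neg]
        intro hcc
        exact hc ((pv_cond_iff g j k m hj hk).1 hcc)
      rw [hcond]
      have hstep : ((3*m : Nat) : Int) + 3 = ((3*(m+1) : Nat) : Int) := by push_cast; ring
      rw [hstep, pv_A_eq_aligned g j k hmem hj hk (m+1)]
      conv_rhs => rw [pvAligned]
      rw [dif_pos (by omega), if_neg hc]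
  · rw [pv_pyRange_three_nil _ _ (by omega)]
    rw [pv_aligned_zero]
    · rfl
    · intro m' hm' hpre
      have hlen := hpre.length_le
      simp only [List.length_append, List.length_drop, hj, hk] at hlen
      omega
termination_by g.toList.length - 3*m
decreasing_by omega

-- Python's % and // by 3 on a nonnegative value, in Nat terms
lemma pv_mod3 (u : Nat) : (PySem.Int.mod ((u : Nat) : Int) 3 = 0) ↔ u % 3 = 0 := by
  simp only [PySem.Int.mod]
  rw [Int.fmod_eq_emod, if_pos (Or.inl (by norm_num))]
  omega

lemma pv_fdiv3 (u : Nat) : PySem.Int.floordiv ((u : Nat) : Int) 3 = ((u / 3 : Nat) : Int) := by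
  simp only [PySem.Int.floordiv]
  rw [Int.fdiv_eq_ediv, if_pos (Or.inl (by norm_num))]
  omega

-- B's find loop equals pvAligned at the first frame index ≥ start (pattern of length 6)
lemma pv_B_eq_aligned (g target : String) (ht : target.toList.length = 6)
    (fuel : Nat) :
    ∀ (s : Nat), s ≤ g.toList.length → g.toList.length + 1 - s ≤ fuel →
    pvBLoop g target fuel (s : Int) = pvAligned g.toList target.toList ((s+2)/3) := by
  induction fuel with
  | zero =>
    intro s hs hf
    omega
  | succ fuel ih =>
    intro s hs hf
    simp only [pvBLoop, PySem.Str.findFrom_eq]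
    rw [PySem.Chars.findFrom_natCast g.toList target.toList s hs]
    by_cases hfind : PySem.Chars.find (g.toList.drop s) target.toList = -1
    · rw [if_pos hfind, if_pos rfl]
      refine (pv_aligned_zero _ _ _ ?_).symm
      intro m' hm' hpre
      rw [PySem.Chars.find_eq_neg_one_iff] at hfind
      apply hfind
      rw [← PySem.Chars.isIn_iff_infix, ← PySem.Chars.exists_prefix_drop_iff_isIn]
      refine ⟨3*m' - s, ?_⟩
      rw [List.drop_drop, show s + (3*m' - s) = 3*m' from by omega]
      exact hpre
    · rw [if_neg hfind]
      have hr0 : 0 ≤ PySem.Chars.find (g.toList.drop s) target.toList := by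
        have := PySem.Chars.neg_one_le_find (g.toList.drop s) target.toList
        omega
      obtain ⟨hpre, hmin⟩ := PySem.Chars.find_spec hr0
      set r := PySem.Chars.find (g.toList.drop s) target.toList with hrdef
      rw [List.drop_drop] at hpre
      set u : Nat := s + r.toNat with hudef
      have hidx : (s : Int) + r = ((u : Nat) : Int) := by omega
      -- any occurrence leaves at least 6 characters
      have hulen : u + 6 ≤ g.toList.length := by
        have := hpre.length_le
        simp only [List.length_drop, ht] at this
        omega
      have hne : ¬ ((s : Int) + r = -1) := by omega
      rw [if_neg hne]
      by_cases hmod : PySem.Int.mod ((s : Int) + r) 3 = 0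
      · rw [if_pos hmod]
        rw [hidx] at hmod
        have hmod' : u % 3 = 0 := (pv_mod3 u).1 hmod
        set m : Nat := u / 3 with hmdef
        have hum : u = 3*m := by omega
        rw [hidx, pv_fdiv3]
        rw [pv_aligned_skip g.toList target.toList ((s+2)/3) m (by omega) ?_]
        · rw [pv_aligned_hit _ _ _ (by omega) (by rwa [← hum])]
        · intro m' hm1 hm2
          refine ⟨by omega, ?_⟩
          intro hp
          refine hmin (3*m' - s) (by omega) ?_
          rw [List.drop_drop, show s + (3*m' - s) = 3*m' from by omega]
          exact hp
      · rw [if_neg hmod]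
        rw [hidx] at hmod
        have hmod' : u % 3 ≠ 0 := fun hc => hmod ((pv_mod3 u).2 hc)
        have hidx1 : ((u : Nat) : Int) + 1 = ((u + 1 : Nat) : Int) := by omega
        rw [hidx, hidx1, ih (u+1) (by omega) (by omega)]
        refine (pv_aligned_skip g.toList target.toList ((s+2)/3) ((u+1+2)/3) (by omega) ?_).symm
        intro m' hm1 hm2
        have h3m : 3*m' < u := by omega
        refine ⟨by omega, ?_⟩
        intro hp
        refine hmin (3*m' - s) (by omega) ?_
        rw [List.drop_drop, show s + (3*m' - s) = 3*m' from by omega]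
        exact hp

-- ===== VERDICT (by name: the statement is the Claim_ definition above) =====
theorem count_TGA_j_followed_by_k_spec : Claim_equal_count_TGA_j_followed_by_k := by
  intro g j k _dom
  unfold Spec_count_TGA_j_followed_by_k count_TGA_j_followed_by_k_alt
  rw [pv_bodyA_eq]
  by_cases hmem : j ∈ pvCodonsRx ∧ k ∈ pvCodonsRy
  · rw [if_neg (by tauto)]
    have hj : j.toList.length = 3 := by
      have h1 := hmem.1
      unfold pvCodonsRx at h1
      simp only [List.mem_cons, List.not_mem_nil, or_false] at h1
      rcases h1 with h|h|h|h <;> subst h <;> decide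
    have hk : k.toList.length = 3 := by
      have h1 := hmem.2
      unfold pvCodonsRy at h1
      simp only [List.mem_cons, List.not_mem_nil, or_false] at h1
      rcases h1 with h|h|h|h|h|h|h|h|h|h|h|h|h|h|h|h <;> subst h <;> decide
    have hA := pv_A_eq_aligned g j k hmem hj hk 0
    have hB := pv_B_eq_aligned g (j ++ k) (by simp [hj, hk]) (g.toList.length + 1) 0 (by omega) (by omega)
    norm_num at hA hB
    have hlen2 : ((g.toList.length : Nat) : Int) = ((g.length : Nat) : Int) := by simp
    have hgl : g.toList.length = g.length := by simp
    rw [PySem.Str.len_eq, hlen2, hA, hgl, hB]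
  · rw [if_pos (by tauto)]
    exact pv_fold_nomem g j k _ 0 hmem
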